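-- pv_equiv track=rewrite | github.com/springboardmentor997-create/Modern-Digital-Banking-Dashboard | backend/app/routers/support.py | generate_bot_response
-- ===== SOURCE A (Python) =====
-- def generate_bot_response(user_message: str) -> str:
--     """Generate appropriate bot responses based on user input"""
--     message_lower = user_message.lower()
--
--     # Account related queries
--     if any(word in message_lower for word in ['account', 'balance', 'login', 'password']):
--         return "I can help you with account-related issues. For account access problems, please verify your email and password. If you're still having trouble, I can connect you with our account specialists."
--
--     # Transaction related queries
--     elif any(word in message_lower for word in ['transaction', 'payment', 'transfer', 'money']):
--         return "For transaction-related questions, I can help you understand your transaction history, pending payments, or transfer issues. What specific transaction concern do you have?"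
--
--     # Technical support
--     elif any(word in message_lower for word in ['bug', 'error', 'not working', 'broken', 'technical']):
--         return "I understand you're experiencing technical difficulties. Can you describe what exactly isn't working? Our technical team can help resolve any app or website issues."
--
--     # Security concerns
--     elif any(word in message_lower for word in ['security', 'fraud', 'suspicious', 'hack', 'unauthorized']):
--         return "Security is our top priority. If you suspect any unauthorized activity, please contact our security team immediately at urmilakshirsagar1945@gmail.com or call +1 (555) 123-4567."
--
--     # Billing questions
--     elif any(word in message_lower for word in ['bill', 'charge', 'fee', 'cost', 'pricing']):
--         return "I can help explain our fees and billing. Most of our basic services are free, with transparent pricing for premium features. What specific billing question do you have?"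
--
--     # Greeting responses
--     elif any(word in message_lower for word in ['hello', 'hi', 'hey', 'good morning', 'good afternoon']):
--         return "Hello! I'm here to help you with any banking questions or issues. What can I assist you with today?"
--
--     # Thank you responses
--     elif any(word in message_lower for word in ['thank', 'thanks', 'appreciate']):
--         return "You're welcome! Is there anything else I can help you with today?"
--
--     # Default response
--     else:
--         return "Thank you for your message. I'm here to help with account issues, transactions, technical support, and general banking questions. Could you please provide more details about what you need assistance with?"
-- ===== SOURCE B (Python) =====
-- RESPONSES = [
--     "I can help you with account-related issues. For account access problems, please verify your email and password. If you're still having trouble, I can connect you with our account specialists.",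
--     "For transaction-related questions, I can help you understand your transaction history, pending payments, or transfer issues. What specific transaction concern do you have?",
--     "I understand you're experiencing technical difficulties. Can you describe what exactly isn't working? Our technical team can help resolve any app or website issues.",
--     "Security is our top priority. If you suspect any unauthorized activity, please contact our security team immediately at urmilakshirsagar1945@gmail.com or call +1 (555) 123-4567.",
--     "I can help explain our fees and billing. Most of our basic services are free, with transparent pricing for premium features. What specific billing question do you have?",
--     "Hello! I'm here to help you with any banking questions or issues. What can I assist you with today?",
--     "You're welcome! Is there anything else I can help you with today?",
--     "Thank you for your message. I'm here to help with account issues, transactions, technical support, and general banking questions. Could you please provide more details about what you need assistance with?",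
-- ]
--
-- # Flat keyword -> priority rank map (rank = index of the response category).
-- KEYWORD_RANK = {}
-- for _rank, _words in enumerate([
--     ['account', 'balance', 'login', 'password'],
--     ['transaction', 'payment', 'transfer', 'money'],
--     ['bug', 'error', 'not working', 'broken', 'technical'],
--     ['security', 'fraud', 'suspicious', 'hack', 'unauthorized'],
--     ['bill', 'charge', 'fee', 'cost', 'pricing'],
--     ['hello', 'hi', 'hey', 'good morning', 'good afternoon'],
--     ['thank', 'thanks', 'appreciate'],
-- ]):
--     for _w in _words:
--         KEYWORD_RANK[_w] = _rank
--
--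
-- def generate_bot_response(user_message: str) -> str:
--     """Scan ALL keywords once, keep the minimum rank found, answer by rank."""
--     message_lower = user_message.lower()
--     best = len(RESPONSES) - 1  # default response rank
--     for word, rank in KEYWORD_RANK.items():
--         if word in message_lower:
--             best = min(best, rank)
--     return RESPONSES[best]
-- ===== Notes on version B (the rewrite author's own statement) =====
-- stated objective: alternative
-- what changed: Replaced the short-circuiting if/elif branch chain by a flat keyword->rank map scanned in full once, keeping the minimum matching rank and indexing the response list by it (no early return, no per-group dispatch).
import Mathlib
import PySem

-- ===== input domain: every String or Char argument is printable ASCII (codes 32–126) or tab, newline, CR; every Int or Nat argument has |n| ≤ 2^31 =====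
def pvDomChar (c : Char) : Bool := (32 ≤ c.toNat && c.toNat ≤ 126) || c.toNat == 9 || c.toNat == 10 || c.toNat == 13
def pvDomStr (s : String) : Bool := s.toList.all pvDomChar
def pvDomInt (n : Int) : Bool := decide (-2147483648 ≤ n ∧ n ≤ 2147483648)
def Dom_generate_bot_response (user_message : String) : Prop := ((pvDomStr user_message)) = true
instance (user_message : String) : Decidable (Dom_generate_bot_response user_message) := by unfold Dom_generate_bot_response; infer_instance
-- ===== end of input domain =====

-- B replaces A's short-circuiting if/elif chain by one full scan over a flat keyword->rank map,
-- keeping the minimum matching rank and indexing the response list by it; same behaviour.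

-- ===== PORT A =====
def generate_bot_response (user_message : String) : String :=
  let message_lower := PySem.Str.lower user_message
  if ["account", "balance", "login", "password"].any (fun word => PySem.Str.isIn word message_lower) then
    "I can help you with account-related issues. For account access problems, please verify your email and password. If you're still having trouble, I can connect you with our account specialists."
  else if ["transaction", "payment", "transfer", "money"].any (fun word => PySem.Str.isIn word message_lower) then
    "For transaction-related questions, I can help you understand your transaction history, pending payments, or transfer issues. What specific transaction concern do you have?"
  else if ["bug", "error", "not working", "broken", "technical"].any (fun word => PySem.Str.isIn word message_lower) then
    "I understand you're experiencing technical difficulties. Can you describe what exactly isn't working? Our technical team can help resolve any app or website issues."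
  else if ["security", "fraud", "suspicious", "hack", "unauthorized"].any (fun word => PySem.Str.isIn word message_lower) then
    "Security is our top priority. If you suspect any unauthorized activity, please contact our security team immediately at urmilakshirsagar1945@gmail.com or call +1 (555) 123-4567."
  else if ["bill", "charge", "fee", "cost", "pricing"].any (fun word => PySem.Str.isIn word message_lower) then
    "I can help explain our fees and billing. Most of our basic services are free, with transparent pricing for premium features. What specific billing question do you have?"
  else if ["hello", "hi", "hey", "good morning", "good afternoon"].any (fun word => PySem.Str.isIn word message_lower) then
    "Hello! I'm here to help you with any banking questions or issues. What can I assist you with today?"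
  else if ["thank", "thanks", "appreciate"].any (fun word => PySem.Str.isIn word message_lower) then
    "You're welcome! Is there anything else I can help you with today?"
  else
    "Thank you for your message. I'm here to help with account issues, transactions, technical support, and general banking questions. Could you please provide more details about what you need assistance with?"

-- ===== PORT B =====
def responses : List String :=
  [ "I can help you with account-related issues. For account access problems, please verify your email and password. If you're still having trouble, I can connect you with our account specialists.",
    "For transaction-related questions, I can help you understand your transaction history, pending payments, or transfer issues. What specific transaction concern do you have?",
    "I understand you're experiencing technical difficulties. Can you describe what exactly isn't working? Our technical team can help resolve any app or website issues.",
    "Security is our top priority. If you suspect any unauthorized activity, please contact our security team immediately at urmilakshirsagar1945@gmail.com or call +1 (555) 123-4567.",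
    "I can help explain our fees and billing. Most of our basic services are free, with transparent pricing for premium features. What specific billing question do you have?",
    "Hello! I'm here to help you with any banking questions or issues. What can I assist you with today?",
    "You're welcome! Is there anything else I can help you with today?",
    "Thank you for your message. I'm here to help with account issues, transactions, technical support, and general banking questions. Could you please provide more details about what you need assistance with?" ]

-- KEYWORD_RANK: the dict built by Source B's module-level double loop (keys are distinct, insertion order).
def keywordRank : List (String × Nat) :=
  (["account", "balance", "login", "password"].map (fun word => (word, 0)))
  ++ (["transaction", "payment", "transfer", "money"].map (fun word => (word, 1)))
  ++ (["bug", "error", "not working", "broken", "technical"].map (fun word => (word, 2)))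
  ++ (["security", "fraud", "suspicious", "hack", "unauthorized"].map (fun word => (word, 3)))
  ++ (["bill", "charge", "fee", "cost", "pricing"].map (fun word => (word, 4)))
  ++ (["hello", "hi", "hey", "good morning", "good afternoon"].map (fun word => (word, 5)))
  ++ (["thank", "thanks", "appreciate"].map (fun word => (word, 6)))

def generate_bot_response_alt (user_message : String) : String :=
  let message_lower := PySem.Str.lower user_message
  let best := keywordRank.foldl
    (fun acc p => if PySem.Str.isIn p.1 message_lower then min acc p.2 else acc)
    (responses.length - 1)
  -- `best` is always < responses.length, so Python's RESPONSES[best] never raises; getD is exact here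
  responses.getD best ""

-- ===== PRECONDITION & SPEC =====
def Spec_generate_bot_response (user_message : String) (out : String) : Prop := out = generate_bot_response_alt user_message
instance (user_message : String) (out : String) : Decidable (Spec_generate_bot_response user_message out) := by unfold Spec_generate_bot_response; infer_instance

-- ===== CLAIM (what is proved, stated in full; the proofs are below) =====
def Claim_equal_generate_bot_response : Prop := ∀ (user_message : String), Dom_generate_bot_response user_message → Spec_generate_bot_response user_message (generate_bot_response user_message)

-- ===== LEMMAS AND PROOFS =====

-- Folding B's min-accumulator over one rank-i group of keywords equals a single group test.
theorem foldl_rank_group (ml : String) (i : Nat) (ws : List String) (acc : Nat) :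
    List.foldl (fun acc p => if PySem.Str.isIn p.1 ml then min acc p.2 else acc) acc
      (ws.map (fun word => (word, i)))
    = if ws.any (fun word => PySem.Str.isIn word ml) then min acc i else acc := by
  induction ws generalizing acc with
  | nil => simp
  | cons h t ih =>
    simp only [List.map_cons, List.foldl_cons, List.any_cons]
    by_cases hc : PySem.Str.isIn h ml = true
    · simp only [hc, if_true, Bool.true_or, ih]
      split_ifs <;> omega
    · simp only [Bool.not_eq_true] at hc
      simp only [hc, Bool.false_or, Bool.false_eq_true, if_false, ih]

-- ===== VERDICT (by name: the statement is the Claim_ definition above) =====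
set_option maxHeartbeats 2000000 in
theorem generate_bot_response_spec : Claim_equal_generate_bot_response := by
  intro m _
  unfold Spec_generate_bot_response
  simp only [generate_bot_response, generate_bot_response_alt, keywordRank, responses,
    List.foldl_append, foldl_rank_group, List.length]
  split_ifs <;> rfl
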